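-- pv_equiv track=rewrite | github.com/fpem123/programmers_challenges | Level 2/방금그곡.py | solution
-- ===== SOURCE A (Python) =====
-- def timeCalc(start, end):
--     shour, smin = map(int, start.split(":"))
--     ehour, emin = map(int, end.split(":"))
--
--     start = shour * 60 + smin
--     end = ehour * 60 + emin
--
--     return end - start
--
-- def soundTransform(soundmap, sound):
--     for before, after in soundmap.items():
--         sound = sound.replace(before, after)
--
--     return sound
--
-- def getSong(time, sound):
--     n, r = divmod(time, len(sound))
--
--     return sound * n + sound[:r]
--
-- def solution(m, musicinfos):
--     answer = '(None)'
--     longestTime = 0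
--     soundmap = {'A#': '0',
--                 'B#': '1',
--                 'C#': '2',
--                 'D#': '3',
--                 'E#': '4',
--                 'F#': '5',
--                 'G#': '6'}
--     m = soundTransform(soundmap, m)
--
--     for musicinfo in musicinfos:
--         start, end, name, sound = musicinfo.split(",")
--         playTime = timeCalc(start, end)
--         sound = soundTransform(soundmap, sound)
--         sound = getSong(playTime, sound)
--
--         if m in sound and playTime > longestTime:
--             answer = name
--             longestTime = playTime
--
--     return answer
-- ===== SOURCE B (Python) =====
-- def solution(m, musicinfos):
--     sharps = {'A': '0', 'B': '1', 'C': '2', 'D': '3', 'E': '4', 'F': '5', 'G': '6'}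
--
--     def tokens(s):
--         # one scan: fuse a letter A-G with a following '#' into its canonical one-char note
--         out = []
--         i = 0
--         while i < len(s):
--             if s[i] in sharps and i + 1 < len(s) and s[i + 1] == '#':
--                 out.append(sharps[s[i]])
--                 i += 2
--             else:
--                 out.append(s[i])
--                 i += 1
--         return out
--
--     def occurs(target, notes, play):
--         # does target occur in the cyclic repetition of notes truncated to play notes?
--         # never materializes the played sequence: compares by index arithmetic mod len(notes)
--         k = len(target)
--         if k == 0:
--             return True
--         if k > play:
--             return False
--         L = len(notes)
--         limit = min(L, play - k + 1)
--         for j in range(limit):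
--             if all(target[t] == notes[(j + t) % L] for t in range(k)):
--                 return True
--         return False
--
--     target = tokens(m)
--     candidates = []
--     for info in musicinfos:
--         start, end, name, sound = info.split(",")
--         sh, sm = start.split(":")
--         eh, em = end.split(":")
--         play = (int(eh) - int(sh)) * 60 + (int(em) - int(sm))
--         if play > 0 and occurs(target, tokens(sound), play):
--             candidates.append((play, name))
--     return max(candidates, key=lambda c: c[0], default=(0, '(None)'))[1]
-- ===== Notes on version B (the rewrite author's own statement) =====
-- stated objective: alternative
-- what changed: B never materializes the played melody: it tokenizes letter+'#' notes in one scan (instead of A's 7-pass replace chain), tests containment by cyclic index arithmetic over the note list (target[t] == notes[(j+t) % L] for offsets j < min(L, play-k+1)) instead of building the play-length string and substring-searching it, and collects matching (play, name) pairs into a candidate list resolved afterwards by one max-with-key pass instead of A's running-best accumulator.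
import Mathlib
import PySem

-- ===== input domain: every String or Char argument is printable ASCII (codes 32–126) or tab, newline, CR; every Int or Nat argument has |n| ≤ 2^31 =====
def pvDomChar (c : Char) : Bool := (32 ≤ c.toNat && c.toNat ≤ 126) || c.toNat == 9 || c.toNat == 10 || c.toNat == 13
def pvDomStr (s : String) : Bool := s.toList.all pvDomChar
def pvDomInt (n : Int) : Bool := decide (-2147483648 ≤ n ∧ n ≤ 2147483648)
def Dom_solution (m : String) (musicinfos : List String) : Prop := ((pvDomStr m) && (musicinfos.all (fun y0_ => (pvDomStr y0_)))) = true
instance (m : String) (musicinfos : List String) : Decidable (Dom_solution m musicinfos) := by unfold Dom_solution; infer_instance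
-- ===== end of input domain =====

-- B tokenizes notes in one scan instead of a replace chain, tests containment by cyclic
-- index arithmetic without materializing the played sequence, and resolves matching
-- candidates with one max-with-key pass instead of a running-best accumulator (alternative algorithm).


-- ===== PORT A =====
-- strings are handled as their code-point lists (PySem.Chars is exact on them)
-- the soundmap dict of A, in insertion order
def pvSoundmapA : List (List Char × List Char) :=
  [(['A','#'],['0']), (['B','#'],['1']), (['C','#'],['2']), (['D','#'],['3']),
   (['E','#'],['4']), (['F','#'],['5']), (['G','#'],['6'])]

-- def timeCalc(start, end)
def timeCalcA (start end_ : List Char) : Int :=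
  match PySem.Chars.splitOn start [':'], PySem.Chars.splitOn end_ [':'] with
  | [sh, sm], [eh, em] =>
    match PySem.Int.ofChars? sh, PySem.Int.ofChars? sm,
          PySem.Int.ofChars? eh, PySem.Int.ofChars? em with
    | some shour, some smin, some ehour, some emin =>
      (ehour * 60 + emin) - (shour * 60 + smin)
    | _, _, _, _ => 0      -- ValueError: outside Pre_
  | _, _ => 0              -- unpacking error: outside Pre_

-- def soundTransform(soundmap, sound)
def soundTransformA (sound : List Char) : List Char :=
  pvSoundmapA.foldl (fun s p => PySem.Chars.replace s p.1 p.2) sound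

-- def getSong(time, sound)
def getSongA (time : Int) (sound : List Char) : List Char :=
  match PySem.Int.divmod? time (sound.length : Int) with
  | some (n, r) => (List.replicate n.toNat sound).flatten ++ PySem.Chars.slice sound none (some r)
  | none => []             -- ZeroDivisionError: outside Pre_

def solution (m : String) (musicinfos : List String) : String :=
  let m' := soundTransformA m.toList
  (musicinfos.foldl (fun (st : String × Int) musicinfo =>
      match PySem.Chars.splitOn musicinfo.toList [','] with
      | [start, end_, name, sound] =>
        let playTime := timeCalcA start end_
        let song := getSongA playTime (soundTransformA sound)
        if PySem.Chars.isIn m' song && decide (st.2 < playTime) then (String.ofList name, playTime)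
        else st
      | _ => st            -- unpacking error: outside Pre_
    ) ("(None)", 0)).1

-- ===== PORT B =====
-- the sharps dict of B
def pvSharpsB : PySem.Dict Char Char :=
  ⟨[('A','0'), ('B','1'), ('C','2'), ('D','3'), ('E','4'), ('F','5'), ('G','6')]⟩

-- def tokens(s): the while loop consumes one or two chars per step
def tokensB : List Char → List Char
  | [] => []
  | c :: rest =>
    match PySem.Dict.get? pvSharpsB c with
    | some d =>
      if rest.head? = some '#' then d :: tokensB rest.tail else c :: tokensB rest
    | none => c :: tokensB rest
termination_by s => s.length
decreasing_by all_goals simp [List.length_tail]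

-- def occurs(target, notes, play): containment in the cyclic repetition of notes
-- truncated to play notes, by index arithmetic mod len(notes)
def occursB (target notes : List Char) (play : Int) : Bool :=
  if target.length = 0 then true
  else if decide ((target.length : Int) > play) then false
  else
    let L : Int := (notes.length : Int)
    let limit : Int := min L (play - (target.length : Int) + 1)
    (PySem.List.pyRange 0 limit 1).any (fun j =>
      (PySem.List.pyRange 0 (target.length : Int) 1).all (fun t =>
        PySem.List.pyGet? target t == PySem.List.pyGet? notes (PySem.Int.mod (j + t) L)))

def solution_alt (m : String) (musicinfos : List String) : String :=
  let target := tokensB m.toList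
  let candidates := musicinfos.foldl (fun (acc : List (Int × String)) info =>
      match PySem.Chars.splitOn info.toList [','] with
      | [start, end_, name, sound] =>
        match PySem.Chars.splitOn start [':'], PySem.Chars.splitOn end_ [':'] with
        | [sh, sm], [eh, em] =>
          match PySem.Int.ofChars? sh, PySem.Int.ofChars? sm,
                PySem.Int.ofChars? eh, PySem.Int.ofChars? em with
          | some a, some b, some c, some d =>
            let play := (c - a) * 60 + (d - b)
            if decide (0 < play) && occursB target (tokensB sound) play then
              acc ++ [(play, String.ofList name)]
            else acc
          | _, _, _, _ => acc
        | _, _ => acc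
      | _ => acc) []
  (PySem.List.maxD candidates (fun c => c.1) (0, "(None)")).2

-- ===== PRECONDITION & SPEC =====
-- a "HH:MM" field that int()-parses in both components
def pvTimeOk (s : List Char) : Bool :=
  match PySem.Chars.splitOn s [':'] with
  | [a, b] => (PySem.Int.ofChars? a).isSome && (PySem.Int.ofChars? b).isSome
  | _ => false

-- one musicinfo entry on which A raises no exception:
-- exactly 4 comma fields, both time fields well formed, nonempty sound
def pvInfoOk (info : String) : Bool :=
  match PySem.Chars.splitOn info.toList [','] with
  | [start, end_, _, sound] => pvTimeOk start && pvTimeOk end_ && !sound.isEmpty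
  | _ => false

-- Pre_ excludes exactly the inputs where Python A raises (ValueError from unpacking or
-- int(), ZeroDivisionError from an empty sound); it admits every input A returns on.
def Pre_solution (m : String) (musicinfos : List String) : Prop :=
  musicinfos.all pvInfoOk = true
instance (m : String) (musicinfos : List String) : Decidable (Pre_solution m musicinfos) := by
  unfold Pre_solution; infer_instance

def pvWitness_solution : String × List String :=
  ("ABC#", ["10:00,10:10,HELLO,C#ABC#", "09:00,09:03,WORLD,ABC#"])

def Spec_solution (m : String) (musicinfos : List String) (out : String) : Prop := out = solution_alt m musicinfos
instance (m : String) (musicinfos : List String) (out : String) : Decidable (Spec_solution m musicinfos out) := by unfold Spec_solution; infer_instance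

-- ===== CLAIM (what is proved, stated in full; the proofs are below) =====
def Claim_equal_solution : Prop := ∀ (m : String) (musicinfos : List String), Dom_solution m musicinfos → Pre_solution m musicinfos → Spec_solution m musicinfos (solution m musicinfos)

-- ===== LEMMAS AND PROOFS =====

-- ---------- part 1: A's replace chain = B's tokenizer ----------

-- one-pattern tokenizer: what a single s.replace(L + '#', d) does, char by char
def tokOne (L d : Char) : List Char → List Char
  | [] => []
  | c :: rest =>
    if c = L ∧ rest.head? = some '#' then d :: tokOne L d rest.tail else c :: tokOne L d rest
termination_by s => s.length
decreasing_by all_goals simp [List.length_tail]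

-- simultaneous tokenizer over an association list of (letter, digit) pairs
def toksG (ps : List (Char × Char)) : List Char → List Char
  | [] => []
  | c :: rest =>
    match List.lookup c ps with
    | some d =>
      if rest.head? = some '#' then d :: toksG ps rest.tail else c :: toksG ps rest
    | none => c :: toksG ps rest
termination_by s => s.length
decreasing_by all_goals simp [List.length_tail]

lemma tokOne_cons_pos (L d c : Char) (rest : List Char) (h : c = L ∧ rest.head? = some '#') :
    tokOne L d (c :: rest) = d :: tokOne L d rest.tail := by rw [tokOne, if_pos h]

lemma tokOne_cons_neg (L d c : Char) (rest : List Char) (h : ¬ (c = L ∧ rest.head? = some '#')) :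
    tokOne L d (c :: rest) = c :: tokOne L d rest := by rw [tokOne, if_neg h]

lemma toksG_cons_none (ps : List (Char × Char)) (c : Char) (rest : List Char)
    (h : List.lookup c ps = none) : toksG ps (c :: rest) = c :: toksG ps rest := by
  rw [toksG, h]

lemma toksG_cons_some_sharp (ps : List (Char × Char)) (c d : Char) (rest : List Char)
    (h : List.lookup c ps = some d) (hh : rest.head? = some '#') :
    toksG ps (c :: rest) = d :: toksG ps rest.tail := by
  rw [toksG, h]; simp [hh]

lemma toksG_cons_some_nosharp (ps : List (Char × Char)) (c d : Char) (rest : List Char)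
    (h : List.lookup c ps = some d) (hh : ¬ rest.head? = some '#') :
    toksG ps (c :: rest) = c :: toksG ps rest := by
  rw [toksG, h]; simp [hh]

lemma replace_go_eq_tokOne (L d : Char) :
    ∀ (fuel : Nat) (l acc : List Char), l.length ≤ fuel →
      PySem.Chars.replace.go [L, '#'] [d] fuel l acc = acc.reverse ++ tokOne L d l := by
  intro fuel
  induction fuel with
  | zero =>
    intro l acc h
    have : l = [] := List.eq_nil_of_length_eq_zero (Nat.le_zero.mp h)
    subst this
    simp [PySem.Chars.replace.go, tokOne]
  | succ n ih =>
    intro l acc h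
    cases l with
    | nil => simp [PySem.Chars.replace.go, tokOne]
    | cons c t =>
      rw [PySem.Chars.replace.go]
      by_cases hp : [L, '#'].isPrefixOf (c :: t) = true
      · obtain ⟨r, hr⟩ := List.isPrefixOf_iff_prefix.mp hp
        simp only [List.cons_append, List.nil_append] at hr
        cases hr
        rw [if_pos hp]
        have ht : tokOne L d (L :: '#' :: r) = d :: tokOne L d r := by
          rw [tokOne]; simp
        rw [ht]
        have hd2 : List.drop [L, '#'].length (L :: '#' :: r) = r := by simp
        rw [hd2, ih _ _ (by simp at h ⊢; omega)]
        simp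
      · rw [if_neg hp]
        rw [tokOne]
        have hcond : ¬ (c = L ∧ t.head? = some '#') := by
          rintro ⟨rfl, hh⟩
          cases t with
          | nil => simp at hh
          | cons x r => simp at hh; subst hh; simp [List.isPrefixOf] at hp
        rw [if_neg hcond]
        rw [ih _ _ (by simp at h ⊢; omega)]
        simp

lemma replace_eq_tokOne (L d : Char) (s : List Char) :
    PySem.Chars.replace s [L, '#'] [d] = tokOne L d s := by
  rw [PySem.Chars.replace]
  simp only [List.isEmpty_cons, Bool.false_eq_true, if_false]
  exact replace_go_eq_tokOne L d s.length s [] le_rfl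

lemma tokOne_head_sharp (L d : Char) (hLs : L ≠ '#') (hds : d ≠ '#') (l : List Char) :
    ((tokOne L d l).head? = some '#') ↔ (l.head? = some '#') := by
  cases l with
  | nil => simp [tokOne]
  | cons c t =>
    by_cases hc : c = L ∧ t.head? = some '#'
    · rw [tokOne_cons_pos L d c t hc]
      have : c ≠ '#' := by rw [hc.1]; exact hLs
      simp [hds, this]
    · rw [tokOne_cons_neg L d c t hc]; simp

lemma toksG_tokOne (L d : Char) (ps : List (Char × Char))
    (hL : List.lookup L ps = none) (hd : List.lookup d ps = none)
    (hLs : L ≠ '#') (hds : d ≠ '#') :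
    ∀ s, toksG ps (tokOne L d s) = toksG ((L, d) :: ps) s := by
  have main : ∀ (n : Nat) (s : List Char), s.length ≤ n →
      toksG ps (tokOne L d s) = toksG ((L, d) :: ps) s := by
    intro n
    induction n with
    | zero =>
      intro s h
      have : s = [] := List.eq_nil_of_length_eq_zero (Nat.le_zero.mp h)
      subst this; simp [tokOne, toksG]
    | succ n ih =>
      intro s h
      cases s with
      | nil => simp [tokOne, toksG]
      | cons c rest =>
        have hlen : rest.length ≤ n := by simp at h; omega
        have hlent : rest.tail.length ≤ n := by rw [List.length_tail]; omega
        by_cases hc : c = L ∧ rest.head? = some '#'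
        · rw [tokOne_cons_pos L d c rest hc]
          rw [toksG_cons_none ps d _ hd]
          have hlk : List.lookup c ((L, d) :: ps) = some d := by rw [hc.1]; simp
          rw [toksG_cons_some_sharp _ c d rest hlk hc.2, ih _ hlent]
        · rw [tokOne_cons_neg L d c rest hc]
          by_cases hcL : c = L
          · have hh : ¬ rest.head? = some '#' := fun h' => hc ⟨hcL, h'⟩
            have hlkp : List.lookup c ps = none := by rw [hcL]; exact hL
            rw [toksG_cons_none ps c _ hlkp]
            have hlk : List.lookup c ((L, d) :: ps) = some d := by rw [hcL]; simp
            rw [toksG_cons_some_nosharp _ c d rest hlk hh, ih _ hlen]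
          · have hbe : (c == L) = false := beq_eq_false_iff_ne.mpr hcL
            have hlk2 : List.lookup c ((L, d) :: ps) = List.lookup c ps := by
              simp [List.lookup, hbe]
            cases hlke : List.lookup c ps with
            | none =>
              rw [toksG_cons_none ps c _ hlke,
                  toksG_cons_none _ c _ (hlk2.trans hlke), ih _ hlen]
            | some e =>
              by_cases hh : rest.head? = some '#'
              · rw [toksG_cons_some_sharp ps c e _ hlke
                      ((tokOne_head_sharp L d hLs hds rest).mpr hh)]
                obtain ⟨r, hr⟩ : ∃ r, rest = '#' :: r := by
                  cases rest with
                  | nil => simp at hh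
                  | cons x r => simp at hh; exact ⟨r, by rw [hh]⟩
                subst hr
                have ht : tokOne L d ('#' :: r) = '#' :: tokOne L d r :=
                  tokOne_cons_neg L d '#' r (by rintro ⟨h1, _⟩; exact hLs h1.symm)
                rw [ht]
                simp only [List.tail_cons]
                rw [toksG_cons_some_sharp _ c e _ (hlk2.trans hlke) hh]
                simp only [List.tail_cons]
                rw [ih _ (by simpa using hlent)]
              · rw [toksG_cons_some_nosharp ps c e _ hlke
                      (fun h' => hh ((tokOne_head_sharp L d hLs hds rest).mp h')),
                    toksG_cons_some_nosharp _ c e _ (hlk2.trans hlke) hh, ih _ hlen]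
  intro s; exact main s.length s le_rfl

lemma toksG_nil_pairs (s : List Char) : toksG [] s = s := by
  induction hn : s.length generalizing s with
  | zero =>
    have : s = [] := List.eq_nil_of_length_eq_zero hn
    subst this; rw [toksG]
  | succ n ih =>
    cases s with
    | nil => rw [toksG]
    | cons c rest =>
      rw [toksG_cons_none [] c rest (by simp), ih rest (by simpa using hn)]

-- A's whole replace chain is the simultaneous tokenizer over the 7 (letter, digit) pairs
lemma transform_eq_toksG (s : List Char) :
    soundTransformA s = toksG pvSharpsB.items s := by
  have h0 : pvSharpsB.items =
      [('A','0'), ('B','1'), ('C','2'), ('D','3'), ('E','4'), ('F','5'), ('G','6')] := rfl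
  rw [h0]
  rw [← toksG_tokOne 'A' '0' _ (by decide) (by decide) (by decide) (by decide) s]
  rw [← toksG_tokOne 'B' '1' _ (by decide) (by decide) (by decide) (by decide) _]
  rw [← toksG_tokOne 'C' '2' _ (by decide) (by decide) (by decide) (by decide) _]
  rw [← toksG_tokOne 'D' '3' _ (by decide) (by decide) (by decide) (by decide) _]
  rw [← toksG_tokOne 'E' '4' _ (by decide) (by decide) (by decide) (by decide) _]
  rw [← toksG_tokOne 'F' '5' _ (by decide) (by decide) (by decide) (by decide) _]
  rw [← toksG_tokOne 'G' '6' _ (by decide) (by decide) (by decide) (by decide) _]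
  rw [toksG_nil_pairs]
  simp only [soundTransformA, pvSoundmapA, List.foldl, replace_eq_tokOne]

lemma dict_get?_eq_lookup (l : List (Char × Char)) (c : Char) :
    PySem.Dict.get? ⟨l⟩ c = List.lookup c l := by
  induction l with
  | nil => simp [PySem.Dict.get?]
  | cons p t ih =>
    cases p with
    | mk a b =>
      by_cases h : a = c
      · subst h; simp [PySem.Dict.get?, List.lookup, List.find?]
      · have h1 : (a == c) = false := beq_eq_false_iff_ne.mpr h
        have h2 : (c == a) = false := beq_eq_false_iff_ne.mpr (Ne.symm h)
        simp [PySem.Dict.get?, List.lookup, List.find?, h1, h2] at ih ⊢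
        exact ih

lemma tokensB_cons_none (c : Char) (rest : List Char)
    (h : PySem.Dict.get? pvSharpsB c = none) : tokensB (c :: rest) = c :: tokensB rest := by
  rw [tokensB, h]

lemma tokensB_cons_some_sharp (c d : Char) (rest : List Char)
    (h : PySem.Dict.get? pvSharpsB c = some d) (hh : rest.head? = some '#') :
    tokensB (c :: rest) = d :: tokensB rest.tail := by
  rw [tokensB, h]; simp [hh]

lemma tokensB_cons_some_nosharp (c d : Char) (rest : List Char)
    (h : PySem.Dict.get? pvSharpsB c = some d) (hh : ¬ rest.head? = some '#') :
    tokensB (c :: rest) = c :: tokensB rest := by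
  rw [tokensB, h]; simp [hh]

lemma tokensB_eq_toksG (s : List Char) : tokensB s = toksG pvSharpsB.items s := by
  have main : ∀ (n : Nat) (s : List Char), s.length ≤ n →
      tokensB s = toksG pvSharpsB.items s := by
    intro n
    induction n with
    | zero =>
      intro s h
      have : s = [] := List.eq_nil_of_length_eq_zero (Nat.le_zero.mp h)
      subst this; rw [toksG, tokensB]
    | succ n ih =>
      intro s h
      cases s with
      | nil => rw [toksG, tokensB]
      | cons c rest =>
        have hlen : rest.length ≤ n := by simp at h; omega
        have hlent : rest.tail.length ≤ n := by rw [List.length_tail]; omega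
        have hget : PySem.Dict.get? pvSharpsB c = List.lookup c pvSharpsB.items :=
          dict_get?_eq_lookup _ c
        cases hlk : List.lookup c pvSharpsB.items with
        | none =>
          rw [tokensB_cons_none c rest (hget.trans hlk),
              toksG_cons_none _ c rest hlk, ih rest hlen]
        | some d =>
          by_cases hh : rest.head? = some '#'
          · rw [tokensB_cons_some_sharp c d rest (hget.trans hlk) hh,
                toksG_cons_some_sharp _ c d rest hlk hh, ih rest.tail hlent]
          · rw [tokensB_cons_some_nosharp c d rest (hget.trans hlk) hh,
                toksG_cons_some_nosharp _ c d rest hlk hh, ih rest hlen]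
  exact main s.length s le_rfl

lemma transform_eq_tokensB (s : List Char) : soundTransformA s = tokensB s := by
  rw [transform_eq_toksG, tokensB_eq_toksG]

lemma tokensB_ne_nil (c : Char) (r : List Char) : tokensB (c :: r) ≠ [] := by
  rw [tokensB]
  cases PySem.Dict.get? pvSharpsB c with
  | none => simp
  | some d => by_cases hh : r.head? = some '#' <;> simp [hh]

-- ---------- part 2: the cyclic check = substring of the expanded song ----------

lemma prefix_drop_iff (xs ys : List Char) (j : Nat) (hk : 0 < ys.length) :
    ys <+: xs.drop j ↔ j + ys.length ≤ xs.length ∧ ∀ t < ys.length, xs[j + t]? = ys[t]? := by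
  constructor
  · intro h
    have hlen := h.length_le
    rw [List.length_drop] at hlen
    have htake := List.prefix_iff_eq_take.mp h
    refine ⟨by omega, fun t ht => ?_⟩
    calc xs[j + t]? = (xs.drop j)[t]? := by rw [List.getElem?_drop]
      _ = ((xs.drop j).take ys.length)[t]? := (List.getElem?_take_of_lt ht).symm
      _ = ys[t]? := by rw [← htake]
  · rintro ⟨hle, hpt⟩
    rw [List.prefix_iff_eq_take]
    apply List.ext_getElem?
    intro i
    by_cases hi : i < ys.length
    · rw [List.getElem?_take_of_lt hi, List.getElem?_drop, hpt i hi]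
    · rw [List.getElem?_eq_none (by omega)]
      rw [List.getElem?_eq_none]
      rw [List.length_take, List.length_drop]
      omega

lemma flatten_replicate_getElem? {α : Type} (n : Nat) (xs : List α) :
    ∀ i, i < n * xs.length → ((List.replicate n xs).flatten)[i]? = xs[i % xs.length]? := by
  induction n with
  | zero => intro i hi; omega
  | succ n ih =>
    intro i hi
    rw [List.replicate_succ, List.flatten_cons]
    by_cases h : i < xs.length
    · rw [List.getElem?_append_left h, Nat.mod_eq_of_lt h]
    · obtain ⟨i', rfl⟩ : ∃ i', i = xs.length + i' := ⟨i - xs.length, by omega⟩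
      rw [List.getElem?_append_right (by omega)]
      simp only [Nat.add_sub_cancel_left]
      rw [ih i' (by rw [Nat.succ_mul] at hi; omega)]
      congr 1
      exact (Nat.add_mod_left _ _).symm

-- characterization of A's expanded song: length and cyclic indexing
lemma getSong_spec (play : Int) (notes : List Char) (hne : notes ≠ []) (hp : 0 < play) :
    (getSongA play notes).length = play.toNat ∧
    ∀ i < play.toNat, (getSongA play notes)[i]? = notes[i % notes.length]? := by
  have hL : 0 < notes.length := List.length_pos_iff.mpr hne
  have hLi : (0 : Int) < (notes.length : Int) := by exact_mod_cast hL
  have hLne : (notes.length : Int) ≠ 0 := by omega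
  set n := PySem.Int.floordiv play (notes.length : Int) with hn
  set r := PySem.Int.mod play (notes.length : Int) with hr
  have hr0 : 0 ≤ r := PySem.Int.mod_nonneg play hLi
  have hrL : r < (notes.length : Int) := PySem.Int.mod_lt play hLi
  have hnr : n * (notes.length : Int) + r = play := PySem.Int.floordiv_mul_add_mod play _
  have hn0 : 0 ≤ n := by
    rw [hn, PySem.Int.floordiv_eq_ediv_of_pos hLi]
    exact Int.ediv_nonneg (le_of_lt hp) (le_of_lt hLi)
  have hdm : PySem.Int.divmod? play (notes.length : Int) = some (n, r) := by
    rw [hn, hr, PySem.Int.divmod?, if_neg hLne, PySem.Int.floordiv, PySem.Int.mod]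
  have hsong : getSongA play notes =
      (List.replicate n.toNat notes).flatten ++ notes.take r.toNat := by
    simp only [getSongA, hdm, PySem.Chars.slice_eq_listSlice]
    rw [PySem.List.slice_to _ hr0]
  have hplay : ((n.toNat * notes.length + r.toNat : Nat) : Int) = play := by
    push_cast [Int.toNat_of_nonneg hn0, Int.toNat_of_nonneg hr0]
    linarith [hnr]
  have hfl : ((List.replicate n.toNat notes).flatten).length = n.toNat * notes.length := by
    simp [List.length_flatten, Nat.mul_comm]
  have hlen : (getSongA play notes).length = play.toNat := by
    rw [hsong, List.length_append, hfl, List.length_take]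
    omega
  refine ⟨hlen, fun i hi => ?_⟩
  rw [hsong]
  by_cases hcase : i < n.toNat * notes.length
  · rw [List.getElem?_append_left (by rw [hfl]; exact hcase)]
    exact flatten_replicate_getElem? n.toNat notes i hcase
  · obtain ⟨i', rfl⟩ : ∃ i', i = n.toNat * notes.length + i' :=
      ⟨i - n.toNat * notes.length, by omega⟩
    have hi' : i' < r.toNat := by omega
    rw [List.getElem?_append_right (by rw [hfl]; omega)]
    rw [hfl]
    simp only [Nat.add_sub_cancel_left]
    rw [List.getElem?_take_of_lt hi', Nat.mul_comm n.toNat notes.length, Nat.mul_add_mod]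
    rw [Nat.mod_eq_of_lt (by omega)]

-- the cyclic-arithmetic check equals substring containment in the expanded song
lemma occursB_eq_isIn (target notes : List Char) (play : Int)
    (hne : notes ≠ []) (hp : 0 < play) :
    occursB target notes play = PySem.Chars.isIn target (getSongA play notes) := by
  obtain ⟨hlen, hidx⟩ := getSong_spec play notes hne hp
  have hL : 0 < notes.length := List.length_pos_iff.mpr hne
  by_cases hk0 : target.length = 0
  · have ht : target = [] := List.length_eq_zero_iff.mp hk0
    subst ht
    rw [occursB]
    simp [PySem.Chars.isIn_nil]
  · by_cases hkp : play < (target.length : Int)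
    · have h1 : occursB target notes play = false := by
        rw [occursB, if_neg hk0]
        simp [hkp]
      rw [h1]
      symm
      rw [PySem.Chars.isIn_eq_false_iff]
      intro hinf
      have hle := hinf.length_le
      rw [hlen] at hle
      omega
    · apply Bool.coe_iff_coe.mp
      rw [← PySem.Chars.exists_prefix_drop_iff_isIn]
      have h2 : occursB target notes play =
          (PySem.List.pyRange 0
              (min ((notes.length : Int)) (play - (target.length : Int) + 1)) 1).any
            (fun j => (PySem.List.pyRange 0 (target.length : Int) 1).all
              (fun t => PySem.List.pyGet? target t ==
                PySem.List.pyGet? notes (PySem.Int.mod (j + t) (notes.length : Int)))) := by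
        rw [occursB, if_neg hk0]
        simp [hkp]
      rw [h2, List.any_eq_true]
      have hkpos : 0 < target.length := by omega
      constructor
      · rintro ⟨j, hjmem, hall⟩
        rw [PySem.List.mem_pyRange_one] at hjmem
        obtain ⟨jn, rfl⟩ : ∃ jn : Nat, j = (jn : Int) :=
          ⟨j.toNat, (Int.toNat_of_nonneg hjmem.1).symm⟩
        have hjL : jn < notes.length := by
          have := hjmem.2
          omega
        have hjk : jn + target.length ≤ play.toNat := by
          have := hjmem.2
          omega
        rw [List.all_eq_true] at hall
        refine ⟨jn, (prefix_drop_iff _ _ _ hkpos).mpr ⟨by omega, fun t ht => ?_⟩⟩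
        have hmem : ((t : Nat) : Int) ∈ PySem.List.pyRange 0 (target.length : Int) 1 := by
          rw [PySem.List.mem_pyRange_one]
          constructor
          · exact Int.natCast_nonneg t
          · exact_mod_cast ht
        have heq := hall _ hmem
        have hcast : (jn : Int) + (t : Int) = ((jn + t : Nat) : Int) := by push_cast; ring
        rw [hcast, PySem.Int.mod_natCast, PySem.List.pyGet?_natCast,
            PySem.List.pyGet?_natCast, beq_iff_eq] at heq
        rw [hidx (jn + t) (by omega)]
        exact heq.symm
      · rintro ⟨j, hpre⟩
        obtain ⟨hjk, hpt⟩ := (prefix_drop_iff _ _ _ hkpos).mp hpre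
        rw [hlen] at hjk
        have hmod : j % notes.length < notes.length := Nat.mod_lt j hL
        have hmle : j % notes.length ≤ j := Nat.mod_le j notes.length
        refine ⟨((j % notes.length : Nat) : Int), ?_, ?_⟩
        · rw [PySem.List.mem_pyRange_one]
          constructor
          · exact Int.natCast_nonneg _
          · have h1 : ((j % notes.length : Nat) : Int) < (notes.length : Int) := by
              exact_mod_cast hmod
            have h2 : ((j % notes.length : Nat) : Int) ≤ play - (target.length : Int) := by
              have : j % notes.length + target.length ≤ play.toNat := by omega
              omega
            omega
        · rw [List.all_eq_true]
          intro t htmem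
          rw [PySem.List.mem_pyRange_one] at htmem
          obtain ⟨tn, rfl⟩ : ∃ tn : Nat, t = (tn : Int) :=
            ⟨t.toNat, (Int.toNat_of_nonneg htmem.1).symm⟩
          have htk : tn < target.length := by exact_mod_cast htmem.2
          have hcast : ((j % notes.length : Nat) : Int) + (tn : Int) =
              ((j % notes.length + tn : Nat) : Int) := by push_cast; ring
          rw [hcast, PySem.Int.mod_natCast, PySem.List.pyGet?_natCast,
              PySem.List.pyGet?_natCast, beq_iff_eq]
          have h3 := hpt tn htk
          rw [hidx (j + tn) (by omega)] at h3
          rw [Nat.mod_add_mod]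
          exact h3.symm

-- ---------- part 3: the running best = max over the candidate list ----------

-- the A-side loop body, named (definitionally equal to the lambda in `solution`)
def stepA (m' : List Char) (st : String × Int) (musicinfo : String) : String × Int :=
  match PySem.Chars.splitOn musicinfo.toList [','] with
  | [start, end_, name, sound] =>
    let playTime := timeCalcA start end_
    let song := getSongA playTime (soundTransformA sound)
    if PySem.Chars.isIn m' song && decide (st.2 < playTime) then (String.ofList name, playTime)
    else st
  | _ => st

-- the B-side loop body, named (definitionally equal to the lambda in `solution_alt`)
def stepB (target : List Char) (acc : List (Int × String)) (info : String) : List (Int × String) :=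
  match PySem.Chars.splitOn info.toList [','] with
  | [start, end_, name, sound] =>
    match PySem.Chars.splitOn start [':'], PySem.Chars.splitOn end_ [':'] with
    | [sh, sm], [eh, em] =>
      match PySem.Int.ofChars? sh, PySem.Int.ofChars? sm,
            PySem.Int.ofChars? eh, PySem.Int.ofChars? em with
      | some a, some b, some c, some d =>
        let play := (c - a) * 60 + (d - b)
        if decide (0 < play) && occursB target (tokensB sound) play then
          acc ++ [(play, String.ofList name)]
        else acc
      | _, _, _, _ => acc
    | _, _ => acc
  | _ => acc

-- A's running state summarizes the candidate list: first maximal play and its name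
def summB (cands : List (Int × String)) : String × Int :=
  match PySem.List.max? cands (fun c => c.1) with
  | none => ("(None)", 0)
  | some c => (c.2, c.1)

lemma max?_append_singleton (cands : List (Int × String)) (c : Int × String) :
    PySem.List.max? (cands ++ [c]) (fun x => x.1) =
      match PySem.List.max? cands (fun x => x.1) with
      | none => some c
      | some m => if m.1 < c.1 then some c else some m := by
  cases h : PySem.List.max? cands (fun x => x.1) with
  | none =>
    rw [PySem.List.max?] at h ⊢
    rw [List.foldl_append, h, List.foldl_cons, List.foldl_nil]
  | some m =>
    rw [PySem.List.max?] at h ⊢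
    rw [List.foldl_append, h, List.foldl_cons, List.foldl_nil]

lemma summB_append (cands : List (Int × String)) (c : Int × String) :
    summB (cands ++ [c]) =
      (match PySem.List.max? cands (fun x => x.1) with
       | none => (c.2, c.1)
       | some m => if m.1 < c.1 then (c.2, c.1) else (m.2, m.1)) := by
  rw [summB, max?_append_singleton]
  cases PySem.List.max? cands (fun x => x.1) with
  | none => rfl
  | some m => by_cases h : m.1 < c.1 <;> simp [h]

lemma step_rel (tgt : List Char) (cands : List (Int × String)) (info : String)
    (hok : pvInfoOk info = true) (hpos : ∀ c ∈ cands, 0 < c.1) :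
    stepA tgt (summB cands) info = summB (stepB tgt cands info) ∧
    ∀ c ∈ stepB tgt cands info, 0 < c.1 := by
  have hsnd : 0 ≤ (summB cands).2 := by
    rw [summB]
    cases hmx : PySem.List.max? cands (fun c => c.1) with
    | none => simp
    | some c => exact le_of_lt (hpos c (PySem.List.max?_mem hmx))
  rw [pvInfoOk] at hok
  split at hok
  case _ start end_ x sound heq =>
    simp only [Bool.and_eq_true] at hok
    obtain ⟨⟨hts, hte⟩, hsnd'⟩ := hok
    rw [pvTimeOk] at hts hte
    split at hts
    case _ sh sm heqs =>
      split at hte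
      case _ eh em heqe =>
        simp only [Bool.and_eq_true, Option.isSome_iff_exists] at hts hte
        obtain ⟨⟨a, ha⟩, ⟨b, hb⟩⟩ := hts
        obtain ⟨⟨c, hc⟩, ⟨d, hd⟩⟩ := hte
        rw [stepA, stepB, heq]
        dsimp only
        rw [heqs, heqe]
        dsimp only
        rw [ha, hb, hc, hd]
        dsimp only
        have hT : timeCalcA start end_ = (c - a) * 60 + (d - b) := by
          rw [timeCalcA, heqs, heqe]
          dsimp only
          rw [ha, hb, hc, hd]
          dsimp only
          ring
        rw [hT]
        set play : Int := (c - a) * 60 + (d - b) with hplay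
        obtain ⟨c0, r0, rfl⟩ : ∃ c0 r0, sound = c0 :: r0 := by
          cases sound with
          | nil => simp at hsnd'
          | cons c0 r0 => exact ⟨c0, r0, rfl⟩
        have hnn : tokensB (c0 :: r0) ≠ [] := tokensB_ne_nil c0 r0
        rw [transform_eq_tokensB]
        by_cases hp0 : 0 < play
        · rw [occursB_eq_isIn tgt (tokensB (c0 :: r0)) play hnn hp0]
          by_cases hin : PySem.Chars.isIn tgt (getSongA play (tokensB (c0 :: r0))) = true
          · rw [hin, decide_eq_true hp0, Bool.true_and, Bool.and_self]
            simp only [if_true]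
            constructor
            · rw [summB_append]
              cases hmx : PySem.List.max? cands (fun x => x.1) with
              | none =>
                have hs : summB cands = ("(None)", 0) := by rw [summB, hmx]
                rw [hs]
                simp [hp0]
              | some m0 =>
                have hs : summB cands = (m0.2, m0.1) := by rw [summB, hmx]
                rw [hs]
                by_cases hlt : m0.1 < play
                · simp [hlt]
                · simp [hlt]
            · intro cc hcc
              rw [List.mem_append] at hcc
              rcases hcc with hcc | hcc
              · exact hpos cc hcc
              · simp at hcc
                rw [hcc]
                exact hp0
          · rw [Bool.not_eq_true] at hin
            rw [hin]
            simp only [Bool.false_and, Bool.and_false, Bool.false_eq_true, if_false]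
            exact ⟨trivial, hpos⟩
        · have hdp : decide (0 < play) = false := by simp [hp0]
          have hdl : decide ((summB cands).2 < play) = false := by
            simp only [decide_eq_false_iff_not]
            omega
          rw [hdp, hdl]
          simp only [Bool.and_false, Bool.false_and, Bool.false_eq_true, if_false]
          exact ⟨trivial, hpos⟩
      case _ => exact absurd hte (by simp)
    case _ => exact absurd hts (by simp)
  case _ => exact absurd hok (by simp)

lemma loop_rel (tgt : List Char) :
    ∀ (infos : List String) (cands : List (Int × String)),
      infos.all pvInfoOk = true → (∀ c ∈ cands, 0 < c.1) →
      infos.foldl (stepA tgt) (summB cands) = summB (infos.foldl (stepB tgt) cands) := by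
  intro infos
  induction infos with
  | nil => intro cands _ _; simp
  | cons info rest ih =>
    intro cands hall hpos
    rw [List.all_cons, Bool.and_eq_true] at hall
    obtain ⟨hstep, hpos'⟩ := step_rel tgt cands info hall.1 hpos
    simp only [List.foldl_cons, hstep]
    exact ih _ hall.2 hpos'

-- ===== VERDICT (by name: the statement is the Claim_ definition above) =====
theorem solution_spec : Claim_equal_solution := by
  unfold Claim_equal_solution Spec_solution
  intro m musicinfos _ hpre
  rw [Pre_solution] at hpre
  show solution m musicinfos = solution_alt m musicinfos
  have hA : solution m musicinfos =
      (musicinfos.foldl (stepA (soundTransformA m.toList)) ("(None)", 0)).1 := rfl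
  have hB : solution_alt m musicinfos =
      (PySem.List.maxD (musicinfos.foldl (stepB (tokensB m.toList)) [])
        (fun c => c.1) (0, "(None)")).2 := rfl
  rw [hA, hB, transform_eq_tokensB]
  have h0 : (("(None)", 0) : String × Int) = summB [] := rfl
  rw [h0, loop_rel (tokensB m.toList) musicinfos [] hpre (by intro c hc; simp at hc)]
  rw [summB, PySem.List.maxD]
  cases PySem.List.max? (musicinfos.foldl (stepB (tokensB m.toList)) []) (fun c => c.1) with
  | none => rfl
  | some c => rfl
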